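-- pv_equiv track=rewrite | github.com/MEIYBAO/OS2 | os_core.py | _fit_pages_list_to_swap
-- ===== SOURCE A (Python) =====
-- from typing import Dict, List, Optional, Tuple
--
-- def _fit_pages_list_to_swap(
--     pages_list: List[int], swap_free: int
-- ) -> List[int]:
--     if swap_free <= 0:
--         return []
--     pages = [max(1, int(x)) for x in pages_list]
--     while sum(pages) > swap_free:
--         idx = max(range(len(pages)), key=lambda i: pages[i])
--         if pages[idx] > 1:
--             pages[idx] -= 1
--         else:
--             break
--     if sum(pages) > swap_free:
--         max_procs = min(len(pages), swap_free)
--         pages = pages[:max_procs]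
--     return pages
-- ===== SOURCE B (Python) =====
-- def _fit_pages_list_to_swap(pages_list, swap_free):
--     # Water-filling: find the level L by binary search, give the +1 remainder
--     # to the rightmost capped entries (matching A's decrement-first-max loop).
--     if swap_free <= 0:
--         return []
--     pages = [p if p > 1 else 1 for p in pages_list]
--     total = sum(pages)
--     if total <= swap_free:
--         return pages
--     n = len(pages)
--     if n > swap_free:
--         return [1] * swap_free
--
--     def capped(level):
--         return sum(p if p < level else level for p in pages)
--
--     lo, hi = 1, max(pages)
--     while lo < hi:
--         mid = (lo + hi + 1) // 2
--         if capped(mid) <= swap_free: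
--             lo = mid
--         else:
--             hi = mid - 1
--     extra = swap_free - capped(lo)
--     out = []
--     for p in reversed(pages):
--         if p > lo:
--             if extra > 0:
--                 out.append(lo + 1)
--                 extra -= 1
--             else:
--                 out.append(lo)
--         else:
--             out.append(p)
--     out.reverse()
--     return out
-- ===== Notes on version B (the rewrite author's own statement) =====
-- stated objective: faster
-- what changed: A removes one page at a time from the current maximum (O(excess*n) decrement loop); B computes the water-filling level directly by binary search over capped sums and assigns the +1 remainder to the rightmost capped entries in a single pass.
import Mathlib
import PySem

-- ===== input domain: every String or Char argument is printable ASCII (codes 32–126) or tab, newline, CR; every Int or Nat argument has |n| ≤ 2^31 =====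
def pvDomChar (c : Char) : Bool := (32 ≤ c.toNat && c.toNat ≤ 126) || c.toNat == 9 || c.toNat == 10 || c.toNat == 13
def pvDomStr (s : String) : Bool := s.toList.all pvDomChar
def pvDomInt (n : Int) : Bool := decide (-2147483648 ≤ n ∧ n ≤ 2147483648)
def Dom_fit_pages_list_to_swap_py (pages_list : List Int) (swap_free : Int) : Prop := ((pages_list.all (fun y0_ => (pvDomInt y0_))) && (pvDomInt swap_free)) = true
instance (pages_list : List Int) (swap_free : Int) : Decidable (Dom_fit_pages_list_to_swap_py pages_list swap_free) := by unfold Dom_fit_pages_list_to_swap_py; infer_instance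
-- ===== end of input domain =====

-- B replaces A's one-page-at-a-time decrement loop (O(excess·n)) by water-filling:
-- binary search for the level, +1 remainder to the rightmost capped entries (O(n log max)).
-- Neither version mutates its arguments' observable state (A mutates a local copy only).

-- ===== PORT A =====

-- helper for A: running max of a nonempty list (Python's max over the values);
-- [] case is junk, unreachable from the port's top level
def pvMax : List Int → Int
  | [] => 0
  | x :: xs => xs.foldl max x

-- helper for A: `max(range(len(pages)), key=lambda i: pages[i])` = FIRST index
-- attaining the maximum (Python's max keeps the earlier element on ties)
def pvArgmax : List Int → Nat
  | [] => 0
  | [_] => 0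
  | x :: y :: t => if pvMax (y :: t) ≤ x then 0 else pvArgmax (y :: t) + 1

-- the two lemmas the loop's termination argument cites
theorem pvSum_set : ∀ (p : List Int) (i : Nat) (v : Int), i < p.length →
    (p.set i v).sum = p.sum - p.getD i 0 + v := by
  intro p
  induction p with
  | nil => intro i v h; simp at h
  | cons x xs ih =>
    intro i v h
    cases i with
    | zero => simp [List.set, List.getD]; ring
    | succ i =>
      simp only [List.set, List.sum_cons, List.getD_cons_succ]
      rw [ih i v (by simpa using h)]
      ring

theorem pvArgmax_lt_length : ∀ (p : List Int), p ≠ [] → pvArgmax p < p.length := by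
  intro p
  induction p with
  | nil => intro h; exact absurd rfl h
  | cons x xs ih =>
    intro _
    cases xs with
    | nil => simp [pvArgmax]
    | cons y t =>
      simp only [pvArgmax]
      split
      · simp
      · have := ih (by simp)
        simp only [List.length_cons] at *
        omega

-- A's while loop: decrement the first maximal entry while the sum exceeds swap_free,
-- break when it is 1.  Guard `pages ≠ []` only makes the recursion total; it never
-- fires on inputs reachable from the top level (there swap_free ≥ 1, so sum > swap_free
-- forces pages ≠ []).
def loopA (pages : List Int) (swap_free : Int) : List Int :=
  if h : swap_free < pages.sum ∧ pages ≠ [] then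
    if 1 < pages.getD (pvArgmax pages) 0 then
      loopA (pages.set (pvArgmax pages) (pages.getD (pvArgmax pages) 0 - 1)) swap_free
    else pages
  else pages
termination_by (pages.sum - swap_free).toNat
decreasing_by
  have hl := pvArgmax_lt_length pages h.2
  rw [pvSum_set pages (pvArgmax pages) _ hl]
  omega

-- tail of A after the clamping comprehension
def fitTailA (pages0 : List Int) (swap_free : Int) : List Int :=
  let pages := loopA pages0 swap_free
  if swap_free < pages.sum then
    -- pages[:max_procs]; max_procs ≥ 0 here (swap_free > 0), so take is exact
    pages.take (min (pages.length : Int) swap_free).toNat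
  else pages

def fit_pages_list_to_swap_py (pages_list : List Int) (swap_free : Int) : List Int :=
  if swap_free ≤ 0 then []
  else fitTailA (pages_list.map (fun x => max 1 x)) swap_free  -- int(x) = x on ints

-- ===== PORT B =====

-- capped(level) = sum(p if p < level else level for p in pages)
def cappedB (pages : List Int) (level : Int) : Int :=
  (pages.map (fun p => if p < level then p else level)).sum

-- mid = (lo + hi + 1) // 2
def midB (lo hi : Int) : Int := PySem.Int.floordiv (lo + hi + 1) 2

theorem midB_bounds (lo hi : Int) (h : lo < hi) : lo < midB lo hi ∧ midB lo hi ≤ hi := by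
  unfold midB
  rw [PySem.Int.floordiv_eq_ediv_of_pos (by omega)]
  omega

-- the `while lo < hi` binary-search loop of B
def bsearchB (pages : List Int) (sf lo hi : Int) : Int :=
  if h : lo < hi then
    if cappedB pages (midB lo hi) ≤ sf then bsearchB pages sf (midB lo hi) hi
    else bsearchB pages sf lo (midB lo hi - 1)
  else lo
termination_by (hi - lo).toNat
decreasing_by
  all_goals have := midB_bounds lo hi h
  all_goals omega

-- one step of B's final loop over reversed(pages)
def fillStep (lo : Int) (st : List Int × Int) (p : Int) : List Int × Int :=
  if lo < p then
    if 0 < st.2 then (st.1 ++ [lo + 1], st.2 - 1) else (st.1 ++ [lo], st.2)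
  else (st.1 ++ [p], st.2)

-- B's final loop: walk reversed(pages), append, reverse the output at the end
def fillB (pages : List Int) (lo extra : Int) : List Int :=
  ((pages.reverse.foldl (fillStep lo) ([], extra)).1).reverse

-- tail of B after the clamping comprehension
def fitTailB (pages : List Int) (swap_free : Int) : List Int :=
  if pages.sum ≤ swap_free then pages
  else if swap_free < (pages.length : Int) then
    List.replicate swap_free.toNat 1  -- [1] * swap_free; swap_free > 0 here, toNat exact
  else
    let hi := (PySem.List.max? pages (fun y => y)).getD 0  -- max(pages); nonempty here
    let lo := bsearchB pages swap_free 1 hi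
    fillB pages lo (swap_free - cappedB pages lo)

def fit_pages_list_to_swap_py_alt (pages_list : List Int) (swap_free : Int) : List Int :=
  if swap_free ≤ 0 then []
  else fitTailB (pages_list.map (fun p => if 1 < p then p else 1)) swap_free

-- ===== PRECONDITION & SPEC =====
def Spec_fit_pages_list_to_swap_py (pages_list : List Int) (swap_free : Int) (out : List Int) : Prop := out = fit_pages_list_to_swap_py_alt pages_list swap_free
instance (pages_list : List Int) (swap_free : Int) (out : List Int) : Decidable (Spec_fit_pages_list_to_swap_py pages_list swap_free out) := by unfold Spec_fit_pages_list_to_swap_py; infer_instance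

-- ===== CLAIM (what is proved, stated in full; the proofs are below) =====
def Claim_equal_fit_pages_list_to_swap_py : Prop := ∀ (pages_list : List Int) (swap_free : Int), Dom_fit_pages_list_to_swap_py pages_list swap_free → Spec_fit_pages_list_to_swap_py pages_list swap_free (fit_pages_list_to_swap_py pages_list swap_free)

-- ===== LEMMAS AND PROOFS =====

-- ---- pvMax / pvArgmax facts ----

theorem foldl_max_cons (t : List Int) : ∀ a b : Int, t.foldl max (max a b) = max a (t.foldl max b) := by
  induction t with
  | nil => intro a b; rfl
  | cons c t ih =>
    intro a b
    simp only [List.foldl]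
    rw [max_assoc, ih]

theorem pvMax_cons (x y : Int) (t : List Int) : pvMax (x :: y :: t) = max x (pvMax (y :: t)) := by
  simp only [pvMax, List.foldl]
  exact foldl_max_cons t x y

theorem pvMax_ge : ∀ (p : List Int), ∀ x ∈ p, x ≤ pvMax p := by
  intro p
  induction p with
  | nil => intro x hx; simp at hx
  | cons a xs ih =>
    intro x hx
    cases xs with
    | nil => simp at hx; simp [pvMax, hx]
    | cons y t =>
      rw [pvMax_cons]
      rcases hx with _ | hx
      · exact le_max_left _ _
      · exact le_trans (ih x (by assumption)) (le_max_right _ _)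

theorem pvMax_mem : ∀ (p : List Int), p ≠ [] → pvMax p ∈ p := by
  intro p
  induction p with
  | nil => intro h; exact absurd rfl h
  | cons a xs ih =>
    intro _
    cases xs with
    | nil => simp [pvMax]
    | cons y t =>
      rw [pvMax_cons]
      rcases max_choice a (pvMax (y :: t)) with h | h
      · rw [h]; exact List.mem_cons_self
      · rw [h]; exact List.mem_cons_of_mem _ (ih (by simp))

theorem pvArgmax_getD : ∀ (p : List Int), p ≠ [] → p.getD (pvArgmax p) 0 = pvMax p := by
  intro p
  induction p with
  | nil => intro h; exact absurd rfl h
  | cons a xs ih =>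
    intro _
    cases xs with
    | nil => simp [pvArgmax, pvMax]
    | cons y t =>
      rw [pvMax_cons]
      simp only [pvArgmax]
      split
      · rename_i h; simp [List.getD, max_eq_left h]
      · rename_i h
        push_neg at h
        rw [max_eq_right (le_of_lt h)]
        simpa [List.getD] using ih (by simp)

theorem pvArgmax_findIdx : ∀ (p : List Int), p ≠ [] →
    pvArgmax p = p.findIdx (fun x => decide (pvMax p ≤ x)) := by
  intro p
  induction p with
  | nil => intro h; exact absurd rfl h
  | cons a xs ih =>
    intro _
    cases xs with
    | nil => simp [pvArgmax, pvMax, List.findIdx_cons]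
    | cons y t =>
      rw [pvMax_cons]
      simp only [pvArgmax]
      split
      · rename_i h
        rw [max_eq_left h]
        simp [List.findIdx_cons, h]
      · rename_i h
        push_neg at h
        rw [max_eq_right (le_of_lt h)]
        rw [List.findIdx_cons]
        have : (decide (pvMax (y :: t) ≤ a)) = false := by simp; omega
        rw [this]
        simp only [cond_false]
        rw [← ih (by simp)]

-- ---- cappedB facts ----

theorem cappedB_nil (L : Int) : cappedB [] L = 0 := rfl

theorem cappedB_cons (x : Int) (xs : List Int) (L : Int) :
    cappedB (x :: xs) L = (if x < L then x else L) + cappedB xs L := by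
  simp [cappedB]

theorem cappedB_mono (p : List Int) : ∀ {L L' : Int}, L ≤ L' → cappedB p L ≤ cappedB p L' := by
  induction p with
  | nil => intro L L' _; simp [cappedB_nil]
  | cons x xs ih =>
    intro L L' h
    rw [cappedB_cons, cappedB_cons]
    have := ih h
    split_ifs <;> omega

theorem cappedB_succ (p : List Int) (L : Int) :
    cappedB p (L + 1) = cappedB p L + (p.countP (fun x => decide (L < x)) : Int) := by
  induction p with
  | nil => simp [cappedB_nil]
  | cons x xs ih =>
    rw [cappedB_cons, cappedB_cons, List.countP_cons, ih]
    push_cast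
    split_ifs <;> simp_all <;> omega

theorem cappedB_of_ge (p : List Int) (M : Int) (h : ∀ x ∈ p, x ≤ M) : cappedB p M = p.sum := by
  induction p with
  | nil => simp [cappedB_nil]
  | cons x xs ih =>
    rw [cappedB_cons, ih (fun x hx => h x (List.mem_cons_of_mem _ hx))]
    have := h x List.mem_cons_self
    simp only [List.sum_cons]
    split_ifs <;> omega

theorem cappedB_one (p : List Int) (h : ∀ x ∈ p, 1 ≤ x) : cappedB p 1 = (p.length : Int) := by
  induction p with
  | nil => simp [cappedB_nil]
  | cons x xs ih =>
    rw [cappedB_cons, ih (fun x hx => h x (List.mem_cons_of_mem _ hx))]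
    have := h x List.mem_cons_self
    simp only [List.length_cons]
    push_cast
    split_ifs <;> omega

theorem cappedB_set : ∀ (p : List Int) (j : Nat) (v L : Int), j < p.length →
    L ≤ v → L ≤ p.getD j 0 → cappedB (p.set j v) L = cappedB p L := by
  intro p
  induction p with
  | nil => intro j v L h; simp at h
  | cons x xs ih =>
    intro j v L hj hv hg
    cases j with
    | zero =>
      simp only [List.getD_cons_zero] at hg
      simp only [List.set]
      rw [cappedB_cons, cappedB_cons]
      split_ifs <;> omega
    | succ j =>
      simp only [List.set]
      rw [cappedB_cons, cappedB_cons,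
        ih j v L (by simpa using hj) hv (by simpa [List.getD] using hg)]

theorem level_unique (p : List Int) {sf r r' : Int}
    (h1 : cappedB p r ≤ sf) (h2 : sf < cappedB p (r + 1))
    (h3 : cappedB p r' ≤ sf) (h4 : sf < cappedB p (r' + 1)) : r = r' := by
  rcases lt_trichotomy r r' with h | h | h
  · have := cappedB_mono p (show r + 1 ≤ r' by omega); omega
  · exact h
  · have := cappedB_mono p (show r' + 1 ≤ r by omega); omega

-- ---- binary-search characterisation ----

theorem bsearch_char (p : List Int) (sf : Int) : ∀ (k : Nat) (lo hi : Int),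
    (hi - lo).toNat ≤ k → lo ≤ hi → cappedB p lo ≤ sf → sf < cappedB p (hi + 1) →
    lo ≤ bsearchB p sf lo hi ∧ bsearchB p sf lo hi ≤ hi ∧
      cappedB p (bsearchB p sf lo hi) ≤ sf ∧ sf < cappedB p (bsearchB p sf lo hi + 1) := by
  intro k
  induction k with
  | zero =>
    intro lo hi hk hle h1 h2
    have heq : lo = hi := by omega
    rw [bsearchB, dif_neg (by omega)]
    exact ⟨le_refl _, le_of_eq heq, h1, by rw [heq]; exact h2⟩
  | succ k ih =>
    intro lo hi hk hle h1 h2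
    by_cases hlh : lo < hi
    · have hm := midB_bounds lo hi hlh
      rw [bsearchB, dif_pos hlh]
      by_cases hc : cappedB p (midB lo hi) ≤ sf
      · rw [if_pos hc]
        have := ih (midB lo hi) hi (by omega) (by omega) hc h2
        exact ⟨by omega, this.2.1, this.2.2.1, this.2.2.2⟩
      · rw [if_neg hc]
        have hmid : midB lo hi - 1 + 1 = midB lo hi := by ring
        have := ih lo (midB lo hi - 1) (by omega) (by omega) h1
          (by rw [hmid]; omega)
        exact ⟨this.1, by omega, this.2.2.1, this.2.2.2⟩
    · have heq : lo = hi := by omega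
      rw [bsearchB, dif_neg hlh]
      exact ⟨le_refl _, le_of_eq heq, h1, by rw [heq]; exact h2⟩

-- ---- fill loop: bridge to a structural right-to-left recursion ----

-- left-to-right processing with the running `extra`
def gLfill (lo : Int) : List Int → Int → List Int × Int
  | [], e => ([], e)
  | x :: xs, e =>
    if lo < x then
      if 0 < e then ((lo + 1) :: (gLfill lo xs (e - 1)).1, (gLfill lo xs (e - 1)).2)
      else (lo :: (gLfill lo xs e).1, (gLfill lo xs e).2)
    else (x :: (gLfill lo xs e).1, (gLfill lo xs e).2)

-- right-to-left processing (rightmost entries consume `extra` first)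
def gRfill (lo : Int) : List Int → Int → List Int × Int
  | [], e => ([], e)
  | x :: xs, e =>
    if lo < x then
      if 0 < (gRfill lo xs e).2 then ((lo + 1) :: (gRfill lo xs e).1, (gRfill lo xs e).2 - 1)
      else (lo :: (gRfill lo xs e).1, (gRfill lo xs e).2)
    else (x :: (gRfill lo xs e).1, (gRfill lo xs e).2)

theorem foldl_fill (lo : Int) : ∀ (l : List Int) (acc : List Int) (e : Int),
    l.foldl (fillStep lo) (acc, e) = (acc ++ (gLfill lo l e).1, (gLfill lo l e).2) := by
  intro l
  induction l with
  | nil => intro acc e; simp [gLfill]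
  | cons x xs ih =>
    intro acc e
    simp only [List.foldl, fillStep, gLfill]
    split_ifs <;> rw [ih] <;> simp

theorem gL_append (lo : Int) : ∀ (a b : List Int) (e : Int),
    gLfill lo (a ++ b) e =
      ((gLfill lo a e).1 ++ (gLfill lo b (gLfill lo a e).2).1,
        (gLfill lo b (gLfill lo a e).2).2) := by
  intro a
  induction a with
  | nil => intro b e; simp [gLfill]
  | cons x xs ih =>
    intro b e
    simp only [List.cons_append, gLfill]
    split_ifs <;> rw [ih] <;> simp

theorem gL_rev (lo : Int) : ∀ (p : List Int) (e : Int),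
    gLfill lo p.reverse e = ((gRfill lo p e).1.reverse, (gRfill lo p e).2) := by
  intro p
  induction p with
  | nil => intro e; simp [gLfill, gRfill]
  | cons x xs ih =>
    intro e
    rw [List.reverse_cons, gL_append, ih]
    simp only [gRfill, gLfill]
    split_ifs <;> simp_all

theorem fillB_gR (p : List Int) (lo e : Int) : fillB p lo e = (gRfill lo p e).1 := by
  unfold fillB
  rw [foldl_fill, gL_rev]
  simp

-- ---- gRfill behaviour ----

theorem gR_snd (lo : Int) : ∀ (p : List Int) (e : Int), 0 ≤ e →
    (gRfill lo p e).2 = max (e - (p.countP (fun x => decide (lo < x)) : Int)) 0 := by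
  intro p
  induction p with
  | nil => intro e he; simp [gRfill]; omega
  | cons x xs ih =>
    intro e he
    simp only [gRfill, List.countP_cons]
    have h2 := ih e he
    split_ifs <;> simp_all <;> push_cast <;> omega

theorem gR_keep (lo : Int) : ∀ (p : List Int) (e : Int), (∀ x ∈ p, x ≤ lo + 1) →
    (p.countP (fun x => decide (lo < x)) : Int) ≤ e → (gRfill lo p e).1 = p := by
  intro p
  induction p with
  | nil => intro e _ _; simp [gRfill]
  | cons x xs ih =>
    intro e hle hc
    rw [List.countP_cons] at hc
    have hxs : (xs.countP (fun x => decide (lo < x)) : Int) ≤ e := by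
      split_ifs at hc <;> push_cast at hc ⊢ <;> omega
    have he : 0 ≤ e := le_trans (by positivity) hxs
    have hsnd := gR_snd lo xs e he
    simp only [gRfill]
    split_ifs with h1 h2
    · have := hle x List.mem_cons_self
      have : x = lo + 1 := by omega
      rw [ih e (fun y hy => hle y (List.mem_cons_of_mem _ hy)) hxs, this]
    · -- lo < x but extra exhausted: impossible since count (x::xs) ≤ e
      exfalso
      rw [hsnd] at h2
      simp only [decide_eq_true_eq] at hc
      rw [if_pos h1] at hc
      push_cast at hc
      omega
    · rw [ih e (fun y hy => hle y (List.mem_cons_of_mem _ hy)) hxs]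

theorem gR_first (lo : Int) : ∀ (p : List Int) (e : Int), (∀ x ∈ p, x ≤ lo + 1) →
    0 ≤ e → e + 1 = (p.countP (fun x => decide (lo < x)) : Int) →
    (gRfill lo p e).1 = p.set (p.findIdx (fun x => decide (lo < x))) lo := by
  intro p
  induction p with
  | nil => intro e _ _ hc; simp at hc; omega
  | cons x xs ih =>
    intro e hle he hc
    rw [List.countP_cons] at hc
    simp only [gRfill, List.findIdx_cons]
    by_cases h1 : lo < x
    · have hcx : (decide (lo < x)) = true := by simpa using h1
      rw [hcx, if_pos rfl] at hc
      push_cast at hc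
      have hxs : (xs.countP (fun x => decide (lo < x)) : Int) = e := by omega
      have hsnd := gR_snd lo xs e he
      rw [if_pos h1]
      rw [hsnd, hxs]
      simp only [sub_self]
      rw [if_neg (by omega)]
      rw [gR_keep lo xs e (fun y hy => hle y (List.mem_cons_of_mem _ hy)) (by omega)]
      simp [hcx]
    · have hcx : (decide (lo < x)) = false := by simpa using h1
      rw [hcx, if_neg (by simp)] at hc
      rw [if_neg h1]
      rw [ih e (fun y hy => hle y (List.mem_cons_of_mem _ hy)) he hc]
      simp [hcx]

theorem gR_set_first (lo : Int) : ∀ (p : List Int) (e : Int), (∀ x ∈ p, x ≤ lo + 1) →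
    0 ≤ e → e + 1 ≤ (p.countP (fun x => decide (lo < x)) : Int) →
    (gRfill lo (p.set (p.findIdx (fun x => decide (lo < x))) lo) e).1 = (gRfill lo p e).1 := by
  intro p
  induction p with
  | nil => intro e _ _ _; simp
  | cons x xs ih =>
    intro e hle he hc
    rw [List.countP_cons] at hc
    by_cases h1 : lo < x
    · have hcx : (decide (lo < x)) = true := by simpa using h1
      rw [hcx, if_pos rfl] at hc
      push_cast at hc
      have hcxs : e ≤ (xs.countP (fun x => decide (lo < x)) : Int) := by omega
      simp only [List.findIdx_cons, hcx, cond_true, List.set]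
      have hsnd := gR_snd lo xs e he
      simp only [gRfill]
      rw [if_neg (by omega), if_pos h1, hsnd, if_neg (by omega)]
    · have hcx : (decide (lo < x)) = false := by simpa using h1
      rw [hcx, if_neg (by simp)] at hc
      simp only [List.findIdx_cons, hcx, cond_false, List.set]
      simp only [gRfill]
      rw [if_neg h1, if_neg h1]
      rw [ih e (fun y hy => hle y (List.mem_cons_of_mem _ hy)) he hc]

theorem forall₂_set (R : Int → Int → Prop) : ∀ (p : List Int) (j : Nat) (v : Int),
    (∀ x ∈ p, R x x) → (j < p.length → R (p.getD j 0) v) → List.Forall₂ R p (p.set j v) := by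
  intro p
  induction p with
  | nil => intro j v _ _; simp
  | cons x xs ih =>
    intro j v hr hj
    cases j with
    | zero =>
      simp only [List.set]
      exact List.Forall₂.cons (by simpa using hj (by simp))
        ((List.forall₂_same).2 (fun y hy => hr y (List.mem_cons_of_mem _ hy)))
    | succ j =>
      simp only [List.set]
      exact List.Forall₂.cons (hr x List.mem_cons_self)
        (ih j v (fun y hy => hr y (List.mem_cons_of_mem _ hy))
          (fun h => by simpa [List.getD] using hj (by simpa using Nat.succ_lt_succ h)))

theorem gR_congr (lo : Int) : ∀ {p q : List Int},
    List.Forall₂ (fun a b => (lo < a ↔ lo < b) ∧ (a ≤ lo → a = b)) p q →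
    ∀ e, gRfill lo p e = gRfill lo q e := by
  intro p q h
  induction h with
  | nil => intro e; rfl
  | cons hab h ih =>
    rename_i a b l₁ l₂
    intro e
    simp only [gRfill, ih e]
    by_cases hx : lo < a
    · rw [if_pos hx, if_pos (hab.1.mp hx)]
    · rw [if_neg hx, if_neg (fun hc => hx (hab.1.mpr hc)), hab.2 (by omega)]

-- ---- assembling the preservation step ----

theorem max?_getD (p : List Int) (h : p ≠ []) :
    (PySem.List.max? p (fun y => y)).getD 0 = pvMax p := by
  cases p with
  | nil => exact absurd rfl h
  | cons x xs => rw [PySem.List.max?_id_cons]; rfl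

theorem findIdx_lt (p : List Int) (m : Int) :
    p.findIdx (fun x => decide (m - 1 < x)) = p.findIdx (fun x => decide (m ≤ x)) := by
  have : (fun x : Int => decide (m - 1 < x)) = (fun x => decide (m ≤ x)) := by
    funext x; simp only [decide_eq_decide]; omega
  rw [this]

-- B's tail is unchanged by one decrement of the first maximal entry
theorem tailB_preserve (p : List Int) (sf : Int) (hsf : 1 ≤ sf)
    (hp : ∀ x ∈ p, 1 ≤ x) (hne : p ≠ []) (hgt : sf < p.sum) (hm1 : 1 < pvMax p) :
    fitTailB (p.set (pvArgmax p) (pvMax p - 1)) sf = fitTailB p sf := by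
  have hjlt : pvArgmax p < p.length := pvArgmax_lt_length p hne
  have hgetD : p.getD (pvArgmax p) 0 = pvMax p := pvArgmax_getD p hne
  set m := pvMax p with hm_def
  set j := pvArgmax p with hj_def
  set q := p.set j (m - 1) with hq_def
  have hlen : q.length = p.length := List.length_set ..
  have hqne : q ≠ [] := by
    intro h
    rw [h] at hlen
    simp only [List.length_nil] at hlen
    exact hne (List.length_eq_zero_iff.1 hlen.symm)
  have hsumq : q.sum = p.sum - 1 := by
    rw [hq_def, pvSum_set p j _ hjlt, hgetD]; ring
  have hpm : ∀ x ∈ p, x ≤ m := pvMax_ge p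
  have hq_le : ∀ x ∈ q, x ≤ m := by
    intro x hx
    rcases List.mem_or_eq_of_mem_set hx with h | h
    · exact hpm x h
    · omega
  have hq_ge1 : ∀ x ∈ q, 1 ≤ x := by
    intro x hx
    rcases List.mem_or_eq_of_mem_set hx with h | h
    · exact hp x h
    · omega
  have hm_in_q : m - 1 ∈ q := by
    have hjq : j < q.length := by rw [hlen]; exact hjlt
    have hq_get : q[j]'hjq = m - 1 := by
      simp only [hq_def]
      simp
    rw [← hq_get]
    exact List.getElem_mem hjq
  have hmq_ge : m - 1 ≤ pvMax q := pvMax_ge q _ hm_in_q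
  have hmq_le : pvMax q ≤ m := hq_le _ (pvMax_mem q hqne)
  have hcap_eq : ∀ L, L ≤ m - 1 → cappedB q L = cappedB p L := by
    intro L hL
    rw [hq_def]
    exact cappedB_set p j (m - 1) L hjlt hL (by omega)
  have hcap_p_m : cappedB p m = p.sum := cappedB_of_ge p m hpm
  have hcount1 : 1 ≤ (p.countP (fun x => decide (m - 1 < x)) : Int) := by
    have : 0 < p.countP (fun x => decide (m - 1 < x)) :=
      List.countP_pos_iff.2 ⟨m, pvMax_mem p hne, by simp only [decide_eq_true_eq]; omega⟩
    exact_mod_cast this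
  have hcap_succ := cappedB_succ p (m - 1)
  rw [show m - 1 + 1 = m by ring] at hcap_succ
  have hcap_pm1 : cappedB p (m - 1) ≤ p.sum - 1 := by omega
  by_cases hqs : q.sum ≤ sf
  · -- one decrement reached the target sum: B on p produces exactly q
    have hps : p.sum = sf + 1 := by omega
    have hn_le : (p.length : Int) ≤ sf := by
      have h1 := cappedB_one p hp
      have h2 := cappedB_mono p (show (1:Int) ≤ m - 1 by omega)
      omega
    rw [fitTailB, if_pos hqs]
    rw [fitTailB, if_neg (by omega), if_neg (by omega)]
    simp only []
    rw [max?_getD p hne, ← hm_def]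
    have hchar := bsearch_char p sf (m - 1).toNat 1 m (by omega) (by omega)
      (by rw [cappedB_one p hp]; omega)
      (by rw [cappedB_of_ge p (m + 1) (fun x hx => by have := hpm x hx; omega)]; omega)
    set L := bsearchB p sf 1 m with hL_def
    have hLm : L = m - 1 := by
      refine level_unique p hchar.2.2.1 hchar.2.2.2 (by omega) ?_
      rw [show m - 1 + 1 = m by ring, hcap_p_m]; omega
    rw [hLm]
    rw [fillB_gR]
    rw [gR_first (m - 1) p (sf - cappedB p (m - 1))
      (fun x hx => by have := hpm x hx; omega) (by omega) (by omega)]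
    rw [findIdx_lt, hq_def, hj_def, pvArgmax_findIdx p hne, ← hm_def]
  · -- still above target: same level, same extras, same fill
    push_neg at hqs
    by_cases hn : sf < (p.length : Int)
    · rw [fitTailB, if_neg (by omega), if_pos (by rw [hlen]; exact hn)]
      rw [fitTailB, if_neg (by omega), if_pos hn]
    · push_neg at hn
      rw [fitTailB, if_neg (by omega), if_neg (by rw [hlen]; omega)]
      rw [fitTailB, if_neg (by omega), if_neg (by omega)]
      simp only []
      rw [max?_getD p hne, max?_getD q hqne, ← hm_def]
      have hcharp := bsearch_char p sf (m - 1).toNat 1 m (by omega) (by omega)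
        (by rw [cappedB_one p hp]; omega)
        (by rw [cappedB_of_ge p (m + 1) (fun x hx => by have := hpm x hx; omega)]; omega)
      set Lp := bsearchB p sf 1 m with hLp_def
      have hLp_le : Lp ≤ m - 1 := by
        by_contra hcon
        push_neg at hcon
        have := cappedB_mono p (show m ≤ Lp by omega)
        omega
      have hcharq := bsearch_char q sf (pvMax q - 1).toNat 1 (pvMax q)
        (by omega) (by omega)
        (by rw [cappedB_one q hq_ge1, hlen]; omega)
        (by rw [cappedB_of_ge q (pvMax q + 1)
              (fun x hx => by have := pvMax_ge q x hx; omega)]; omega)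
      set Lq := bsearchB q sf 1 (pvMax q) with hLq_def
      have hcap_q_m : cappedB q m = q.sum :=
        cappedB_of_ge q m hq_le
      have hLq_eq : Lq = Lp := by
        refine level_unique q hcharq.2.2.1 hcharq.2.2.2 ?_ ?_
        · rw [hcap_eq Lp hLp_le]; exact hcharp.2.2.1
        · by_cases hLe : Lp + 1 ≤ m - 1
          · rw [hcap_eq _ hLe]; exact hcharp.2.2.2
          · have : Lp + 1 = m := by omega
            rw [this, hcap_q_m]; omega
      rw [hLq_eq]
      have hext : cappedB q Lp = cappedB p Lp := hcap_eq Lp hLp_le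
      rw [hext]
      set e := sf - cappedB p Lp with he_def
      have he0 : 0 ≤ e := by have := hcharp.2.2.1; omega
      rw [fillB_gR, fillB_gR]
      by_cases hLm : Lp = m - 1
      · -- decremented entry sits exactly at the level: it is just not chosen
        have hcnt : e + 1 ≤ (p.countP (fun x => decide (m - 1 < x)) : Int) := by
          have h2 := hcharp.2.2.2
          rw [hLm] at h2 he_def
          have h3 := cappedB_succ p (m - 1)
          omega
        rw [hLm]
        rw [hq_def, hj_def, pvArgmax_findIdx p hne, ← hm_def, ← findIdx_lt p m]
        exact gR_set_first (m - 1) p e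
          (fun x hx => by have := hpm x hx; omega) he0 hcnt
      · -- decremented entry stays strictly above the level: capped values identical
        have hLlt : Lp < m - 1 := by omega
        have hF : List.Forall₂ (fun a b => (Lp < a ↔ Lp < b) ∧ (a ≤ Lp → a = b)) p q := by
          rw [hq_def]
          apply forall₂_set
          · exact fun x _ => ⟨Iff.rfl, fun _ => rfl⟩
          · intro _
            rw [hgetD]
            exact ⟨by constructor <;> intro <;> omega, by intro hcon; omega⟩
        rw [gR_congr Lp hF e]

-- ---- the main induction along A's loop ----

theorem tail_eq (sf : Int) (hsf : 1 ≤ sf) : ∀ (n : Nat) (p : List Int),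
    (p.sum - sf).toNat ≤ n → (∀ x ∈ p, 1 ≤ x) → fitTailA p sf = fitTailB p sf := by
  intro n
  induction n with
  | zero =>
    intro p hn hp
    have hle : p.sum ≤ sf := by omega
    rw [fitTailA, fitTailB, if_pos hle]
    rw [loopA, dif_neg (by simp; omega)]
    rw [if_neg (by omega)]
  | succ n ih =>
    intro p hn hp
    by_cases hle : p.sum ≤ sf
    · rw [fitTailA, fitTailB, if_pos hle]
      rw [loopA, dif_neg (by simp; omega)]
      rw [if_neg (by omega)]
    · push_neg at hle
      have hne : p ≠ [] := by
        intro h; rw [h] at hle; simp at hle; omega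
      have hgetD : p.getD (pvArgmax p) 0 = pvMax p := pvArgmax_getD p hne
      have hjlt : pvArgmax p < p.length := pvArgmax_lt_length p hne
      have hm_mem : pvMax p ∈ p := pvMax_mem p hne
      have hm1 : 1 ≤ pvMax p := hp _ hm_mem
      by_cases hm : 1 < pvMax p
      · -- decrement step + induction hypothesis + preservation
        have hstep : loopA p sf = loopA (p.set (pvArgmax p) (pvMax p - 1)) sf := by
          rw [loopA, dif_pos ⟨hle, hne⟩, if_pos (by rw [hgetD]; exact hm), hgetD]
        have hsumq : (p.set (pvArgmax p) (pvMax p - 1)).sum = p.sum - 1 := by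
          rw [pvSum_set p _ _ hjlt, hgetD]; ring
        have hq1 : ∀ x ∈ p.set (pvArgmax p) (pvMax p - 1), 1 ≤ x := by
          intro x hx
          rcases List.mem_or_eq_of_mem_set hx with h | h
          · exact hp x h
          · omega
        have : fitTailA p sf = fitTailA (p.set (pvArgmax p) (pvMax p - 1)) sf := by
          rw [fitTailA, fitTailA, hstep]
        rw [this, ih _ (by omega) hq1]
        exact tailB_preserve p sf hsf hp hne hle hm
      · -- every entry is 1: A breaks and truncates, B returns [1] * swap_free
        have hall1 : ∀ x ∈ p, x = 1 := by
          intro x hx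
          have := pvMax_ge p x hx
          have := hp x hx
          omega
        have hrep : p = List.replicate p.length 1 :=
          List.eq_replicate_of_mem hall1
        have hsum : p.sum = (p.length : Int) := by
          conv_lhs => rw [hrep]
          simp [List.sum_replicate]
        have hloop : loopA p sf = p := by
          rw [loopA, dif_pos ⟨hle, hne⟩, if_neg (by rw [hgetD]; omega)]
        rw [fitTailA, fitTailB]
        simp only [hloop]
        rw [if_pos hle]
        rw [if_neg (show ¬ p.sum ≤ sf by omega)]
        rw [if_pos (show sf < (p.length : Int) by omega)]
        have hmin : min (p.length : Int) sf = sf := by omega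
        rw [hmin]
        conv_lhs => rw [hrep]
        rw [List.take_replicate]
        congr 1
        omega

-- the two clamping comprehensions agree pointwise
theorem map_clamp_eq (l : List Int) :
    l.map (fun x : Int => max 1 x) = l.map (fun p : Int => if 1 < p then p else 1) := by
  apply List.map_congr_left
  intro a _
  split_ifs <;> omega

-- ===== VERDICT (by name: the statement is the Claim_ definition above) =====
theorem fit_pages_list_to_swap_py_spec : Claim_equal_fit_pages_list_to_swap_py := by
  unfold Claim_equal_fit_pages_list_to_swap_py Spec_fit_pages_list_to_swap_py
  intro pages_list swap_free _
  rw [fit_pages_list_to_swap_py, fit_pages_list_to_swap_py_alt]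
  by_cases hsf : swap_free ≤ 0
  · rw [if_pos hsf, if_pos hsf]
  · rw [if_neg hsf, if_neg hsf, ← map_clamp_eq]
    exact tail_eq swap_free (by omega) _ _ (le_refl _)
      (fun x hx => by
        rcases List.mem_map.1 hx with ⟨y, _, rfl⟩
        exact le_max_left 1 y)
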